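-- pv_equiv track=rewrite | github.com/Thiago-Fernandes-Dias/processamento_da_informacao | lista_8/Q4.py | oneAloneCheck
-- ===== SOURCE A (Python) =====
-- def oneAloneCheck(matrix):
--     ones = []
--     for line in matrix:
--         for value in line:
--             if value == 1:
--                 ones.append(value)
--                 continue
--             if value != 0:
--                 return False
--     oneCheck = len(ones) == len(matrix)
--     return oneCheck
-- ===== SOURCE B (Python) =====
-- def oneAloneCheck(matrix):
--     def row(vals, budget):
--         # consume one row recursively, spending the remaining-ones budget;
--         # None = invalid value or budget overdrawn
--         if not vals:
--             return budget
--         v = vals[0]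
--         if v == 1:
--             if budget == 0:
--                 return None
--             return row(vals[1:], budget - 1)
--         if v != 0:
--             return None
--         return row(vals[1:], budget)
--
--     def go(rows, budget):
--         if not rows:
--             return budget == 0
--         b = row(rows[0], budget)
--         if b is None:
--             return False
--         return go(rows[1:], b)
--
--     return go(matrix, len(matrix))
-- ===== Notes on version B (the rewrite author's own statement) =====
-- stated objective: alternative
-- what changed: Replaces A's count-up-and-compare (append every 1 to a list, then compare its length with the row count) by a recursive countdown: a budget of len(matrix) ones is spent while scanning, failing early the moment the budget is overdrawn or a non-{0,1} value appears, and succeeding iff the budget ends exactly at zero.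
import Mathlib
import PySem

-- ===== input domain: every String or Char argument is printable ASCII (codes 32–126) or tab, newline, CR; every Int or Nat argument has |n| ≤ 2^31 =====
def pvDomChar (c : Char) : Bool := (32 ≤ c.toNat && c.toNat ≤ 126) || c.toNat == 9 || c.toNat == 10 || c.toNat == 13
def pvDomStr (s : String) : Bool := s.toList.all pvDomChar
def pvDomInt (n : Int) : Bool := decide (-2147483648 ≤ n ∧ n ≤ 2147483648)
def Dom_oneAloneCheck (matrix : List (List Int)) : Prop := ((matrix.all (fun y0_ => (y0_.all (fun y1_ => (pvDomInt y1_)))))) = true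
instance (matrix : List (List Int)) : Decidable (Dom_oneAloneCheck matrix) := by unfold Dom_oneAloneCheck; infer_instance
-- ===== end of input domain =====

-- B replaces A's count-up-and-compare (accumulator list of ones, length compared with the row count at the end) by a recursive countdown of a ones-budget with early failure on overdraft: an alternative decomposition of the same cost.


-- ===== PORT A =====
-- inner loop over one row: appends each 1 to `ones`, early-returns False (none) on a value ≠ 0,1
def pyLineLoop (line : List Int) (ones : List Int) : Option (List Int) :=
  match line with
  | [] => some ones
  | v :: rest =>
    if v = 1 then pyLineLoop rest (ones ++ [v])
    else if v ≠ 0 then none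
    else pyLineLoop rest ones

def pyRowsLoop (rows : List (List Int)) (ones : List Int) : Option (List Int) :=
  match rows with
  | [] => some ones
  | line :: rest =>
    match pyLineLoop line ones with
    | none => none
    | some ones' => pyRowsLoop rest ones'

def oneAloneCheck (matrix : List (List Int)) : Bool :=
  match pyRowsLoop matrix [] with
  | none => false
  | some ones => decide (ones.length = matrix.length)

-- ===== PORT B =====
-- `row`: spend the remaining-ones budget along one row; none = invalid value or overdraft
def altRow (vals : List Int) (budget : Nat) : Option Nat :=
  match vals with
  | [] => some budget
  | v :: rest =>
    if v = 1 then
      if budget = 0 then none else altRow rest (budget - 1)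
    else if v ≠ 0 then none
    else altRow rest budget

def altGo (rows : List (List Int)) (budget : Nat) : Bool :=
  match rows with
  | [] => decide (budget = 0)
  | r :: rest =>
    match altRow r budget with
    | none => false
    | some b => altGo rest b

def oneAloneCheck_alt (matrix : List (List Int)) : Bool :=
  altGo matrix matrix.length

-- ===== PRECONDITION & SPEC =====
def Spec_oneAloneCheck (matrix : List (List Int)) (out : Bool) : Prop := out = oneAloneCheck_alt matrix
instance (matrix : List (List Int)) (out : Bool) : Decidable (Spec_oneAloneCheck matrix out) := by unfold Spec_oneAloneCheck; infer_instance

-- ===== CLAIM (what is proved, stated in full; the proofs are below) =====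
def Claim_equal_oneAloneCheck : Prop := ∀ (matrix : List (List Int)), Dom_oneAloneCheck matrix → Spec_oneAloneCheck matrix (oneAloneCheck matrix)

-- ===== LEMMAS AND PROOFS =====

def isBad (v : Int) : Bool := !(v == 0) && !(v == 1)

def onesCnt (line : List Int) : Nat := line.countP (fun v => v == 1)

-- A's inner loop: none iff the row has a bad value, else the filtered ones are appended
lemma pyLineLoop_eq (line : List Int) (ones : List Int) :
    pyLineLoop line ones =
      if line.any isBad then none
      else some (ones ++ line.filter (fun v => v == 1)) := by
  induction line generalizing ones with
  | nil => simp [pyLineLoop]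
  | cons v rest ih =>
    by_cases h1 : v = 1
    · subst h1
      simp [pyLineLoop, ih, isBad, List.append_assoc]
    · by_cases h0 : v = 0
      · subst h0
        simp [pyLineLoop, ih, isBad]
      · simp [pyLineLoop, h1, h0, isBad, List.any_cons]

lemma pyRowsLoop_eq (rows : List (List Int)) (ones : List Int) :
    pyRowsLoop rows ones =
      if rows.any (fun r => r.any isBad) then none
      else some (ones ++ rows.flatMap (fun r => r.filter (fun v => v == 1))) := by
  induction rows generalizing ones with
  | nil => simp [pyRowsLoop]
  | cons line rest ih =>
    simp only [pyRowsLoop, pyLineLoop_eq]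
    by_cases hl : line.any isBad
    · simp [hl]
    · simp [hl, ih, List.flatMap_cons, List.append_assoc]

-- B's row: none iff bad value or overdraft, else the budget minus the row's ones
lemma altRow_eq (vals : List Int) (budget : Nat) :
    altRow vals budget =
      if vals.any isBad ∨ budget < onesCnt vals then none
      else some (budget - onesCnt vals) := by
  induction vals generalizing budget with
  | nil => simp [altRow, onesCnt]
  | cons v rest ih =>
    by_cases h1 : v = 1
    · subst h1
      have hc : onesCnt (1 :: rest) = onesCnt rest + 1 := by
        simp [onesCnt]
      by_cases hb : budget = 0
      · subst hb
        simp [altRow, hc, isBad]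
      · rw [show altRow (1 :: rest) budget = altRow rest (budget - 1) from by
          simp [altRow, hb]]
        rw [ih, hc]
        by_cases hbad : rest.any isBad
        · simp [hbad, isBad]
        · simp only [hbad, List.any_cons, isBad, Bool.false_eq_true, false_or,
            show (!((1:Int) == 0) && !((1:Int) == 1)) = false from by decide,
            Bool.false_or]
          split_ifs <;> first
            | rfl
            | (exfalso; omega)
            | (congr 1; omega)
    · by_cases h0 : v = 0
      · subst h0
        have hc : onesCnt (0 :: rest) = onesCnt rest := by
          simp [onesCnt]
        simp [altRow, ih, hc, isBad]
      · simp [altRow, h1, h0, isBad, List.any_cons]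

def totalOnes (rows : List (List Int)) : Nat :=
  (rows.map onesCnt).sum

lemma altGo_eq (rows : List (List Int)) (budget : Nat) :
    altGo rows budget =
      decide ((rows.any (fun r => r.any isBad)) = false ∧ totalOnes rows = budget) := by
  induction rows generalizing budget with
  | nil => simp [altGo, totalOnes, eq_comm]
  | cons line rest ih =>
    simp only [altGo, altRow_eq]
    by_cases hl : line.any isBad
    · simp [hl]
    · by_cases hb : budget < onesCnt line
      · have hne : totalOnes (line :: rest) ≠ budget := by
          simp only [totalOnes, List.map_cons, List.sum_cons]
          omega
        simp [hl, hb, hne]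
      · rw [if_neg (not_or.mpr ⟨hl, hb⟩)]
        simp only [ih]
        rw [decide_eq_decide]
        constructor
        · rintro ⟨h, he⟩
          refine ⟨by simp [hl, h], ?_⟩
          simp only [totalOnes, List.map_cons, List.sum_cons] at *
          omega
        · rintro ⟨h, he⟩
          simp only [List.any_cons, Bool.or_eq_false_iff] at h
          refine ⟨h.2, ?_⟩
          simp only [totalOnes, List.map_cons, List.sum_cons] at *
          omega

lemma flat_len (rows : List (List Int)) :
    (rows.flatMap (fun r => r.filter (fun v => v == 1))).length = totalOnes rows := by
  induction rows with
  | nil => simp [totalOnes]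
  | cons line rest ih =>
    simp [List.flatMap_cons, totalOnes, onesCnt, ih, List.countP_eq_length_filter]

-- ===== VERDICT (by name: the statement is the Claim_ definition above) =====
theorem oneAloneCheck_spec : Claim_equal_oneAloneCheck := by
  intro matrix _
  unfold Spec_oneAloneCheck oneAloneCheck oneAloneCheck_alt
  rw [pyRowsLoop_eq, altGo_eq]
  by_cases h : matrix.any (fun r => r.any isBad)
  · simp [h]
  · simp only [h, if_false, Bool.false_eq_true, List.nil_append]
    rw [decide_eq_decide]
    rw [flat_len]
    simp
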